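-- pv_equiv track=rewrite | github.com/ongThien/tira_spring2025 | week3/dividend.py | find_profits
-- ===== SOURCE A (Python) =====
-- def find_profits(prices):
--     n = len(prices)
--     res = []
--     min_price_plus_day = prices[0] + 0  # prices[a] + a
--
--     for day in range(n):
--         profit = prices[day] + day - min_price_plus_day
--         res.append(profit if profit >= 0 else 0)
--         min_price_plus_day = min(min_price_plus_day, prices[day] + day)
--
--     return res
-- ===== SOURCE B (Python) =====
-- def find_profits(prices):
--     # Divide and conquer on the index-adjusted prices t[i] = prices[i] + i.
--     # solve(seg) returns (pairs, m): m = min(seg), and pairs[i] = (t, d) where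
--     # d = t minus the minimum of seg's prefix ending at t (inclusive).  The
--     # merge repairs the right half's deficits with the left half's minimum.
--     # Including the day itself in the minimum is correct: its own zero deficit is clamped away.
--     if not prices:
--         return []
--     t = [p + i for i, p in enumerate(prices)]
--
--     def solve(seg):
--         if len(seg) == 1:
--             return [(seg[0], 0)], seg[0]
--         mid = len(seg) // 2
--         left, ml = solve(seg[:mid])
--         right, mr = solve(seg[mid:])
--         merged = left + [(ti, max(di, ti - ml)) for ti, di in right]
--         return merged, min(ml, mr)
--
--     pairs, _ = solve(t)
--     return [max(0, d) for _, d in pairs]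
-- ===== Notes on version B (the rewrite author's own statement) =====
-- stated objective: alternative
-- what changed: Replaces A's left-to-right pass with a carried running minimum by a divide-and-conquer on the index-adjusted array: each half is solved independently into (value, deficit-to-inclusive-prefix-min) pairs and the merge step repairs the right half's deficits with the left half's minimum, clamping negatives to zero only at the end.
import Mathlib
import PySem

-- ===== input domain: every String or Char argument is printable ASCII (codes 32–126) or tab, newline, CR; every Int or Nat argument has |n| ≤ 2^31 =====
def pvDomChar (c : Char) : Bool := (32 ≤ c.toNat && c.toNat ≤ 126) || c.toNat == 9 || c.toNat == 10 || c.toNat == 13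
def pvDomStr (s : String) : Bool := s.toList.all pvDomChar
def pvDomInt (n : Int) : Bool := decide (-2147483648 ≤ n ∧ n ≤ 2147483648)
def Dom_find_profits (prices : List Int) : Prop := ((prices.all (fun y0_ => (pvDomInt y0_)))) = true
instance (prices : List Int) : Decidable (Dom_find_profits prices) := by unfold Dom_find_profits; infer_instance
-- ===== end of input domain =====

-- B replaces A's left-to-right pass with a carried running minimum by a divide-and-conquer
-- on the index-adjusted array, merging halves by repairing the right half's deficits with
-- the left half's minimum; alternative algorithm, not claimed faster.

-- ===== PORT A =====
def find_profits (prices : List Int) : List Int :=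
  let n : Int := prices.length
  let m0 : Int := PySem.List.pyGetD prices 0 0 + 0
  ((PySem.List.pyRange 0 n 1).foldl
    (fun (st : List Int × Int) day =>
      let profit := PySem.List.pyGetD prices day 0 + day - st.2
      (st.1 ++ [if profit ≥ 0 then profit else 0],
       min st.2 (PySem.List.pyGetD prices day 0 + day)))
    ([], m0)).1

-- ===== PORT B =====
-- Source B's recursive solve; the `[] => ([], 0)` branch is unreachable (solve is never
-- called on an empty segment) and only makes the recursion total
def solveB (seg : List Int) : List (Int × Int) × Int :=
  if h : seg.length ≤ 1 then
    match seg with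
    | [] => ([], 0)
    | x :: _ => ([(x, 0)], x)
  else
    let mid := seg.length / 2
    let left := solveB (seg.take mid)
    let right := solveB (seg.drop mid)
    (left.1 ++ right.1.map (fun p => (p.1, max p.2 (p.1 - left.2))), min left.2 right.2)
termination_by seg.length
decreasing_by
  · simp only [List.length_take]; omega
  · simp only [List.length_drop]; omega

def find_profits_alt (prices : List Int) : List Int :=
  if prices.isEmpty then []
  else
    let t := prices.zipIdx.map (fun p => p.1 + (p.2 : Int))
    ((solveB t).1).map (fun q => max 0 q.2)

-- ===== PRECONDITION & SPEC =====
-- Pre_ excludes exactly the empty list, on which A raises IndexError reading the first price.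
def Pre_find_profits (prices : List Int) : Prop := prices ≠ []
instance (prices : List Int) : Decidable (Pre_find_profits prices) := by unfold Pre_find_profits; infer_instance
def pvWitness_find_profits : List Int := [3, 1, 4, 1]

def Spec_find_profits (prices : List Int) (out : List Int) : Prop := out = find_profits_alt prices
instance (prices : List Int) (out : List Int) : Decidable (Spec_find_profits prices out) := by unfold Spec_find_profits; infer_instance

-- ===== CLAIM (what is proved, stated in full; the proofs are below) =====
def Claim_equal_find_profits : Prop := ∀ (prices : List Int), Dom_find_profits prices → Pre_find_profits prices → Spec_find_profits prices (find_profits prices)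

-- ===== LEMMAS AND PROOFS =====

-- the index-adjusted list t with t[k] = prices[k] + k
def tAdj (prices : List Int) : List Int :=
  prices.zipIdx.map (fun p => p.1 + (p.2 : Int))

-- reference recursion: A's loop body on the index-adjusted list
def coreA (m : Int) : List Int → List Int
  | [] => []
  | x :: xs => (if x - m ≥ 0 then x - m else 0) :: coreA (min m x) xs

lemma foldA_core (ts : List Int) (acc : List Int) (m : Int) :
    (ts.foldl
      (fun (st : List Int × Int) x =>
        (st.1 ++ [if x - st.2 ≥ 0 then x - st.2 else 0], min st.2 x)) (acc, m)).1
    = acc ++ coreA m ts := by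
  induction ts generalizing acc m with
  | nil => simp [coreA]
  | cons x xs ih =>
      simp only [List.foldl_cons, coreA, ih, List.append_assoc, List.singleton_append]

lemma t_eq_range_map (prices : List Int) :
    (PySem.List.pyRange 0 (prices.length : Int) 1).map
      (fun day => PySem.List.pyGetD prices day 0 + day)
    = tAdj prices := by
  rw [PySem.List.pyRange_one]
  simp only [tAdj, sub_zero, Int.toNat_natCast, List.map_map]
  apply List.ext_getElem
  · simp
  · intro i h1 h2
    simp only [List.getElem_map, List.getElem_range, Function.comp_apply,
      List.getElem_zipIdx]
    have hi : i < prices.length := by simpa using h2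
    simp [PySem.List.pyGetD_natCast, List.getElem?_eq_getElem hi]

-- A as coreA over the index-adjusted list
lemma A_eq_core (prices : List Int) :
    find_profits prices = coreA (PySem.List.pyGetD prices 0 0 + 0) (tAdj prices) := by
  unfold find_profits
  have h := List.foldl_map
      (f := fun (day : Int) => PySem.List.pyGetD prices day 0 + day)
      (g := fun (st : List Int × Int) (x : Int) =>
        (st.1 ++ [if x - st.2 ≥ 0 then x - st.2 else 0], min st.2 x))
      (l := PySem.List.pyRange 0 (prices.length : Int) 1)
      (init := ([], PySem.List.pyGetD prices 0 0 + 0))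
  simp only at h ⊢
  rw [← h, t_eq_range_map, foldA_core, List.nil_append]

-- (value, deficit) pairs with an external prefix minimum m carried in
def pairsC (m : Int) : List Int → List (Int × Int)
  | [] => []
  | x :: xs => (x, x - min m x) :: pairsC (min m x) xs

lemma pairsC_comb (xs : List Int) (m e : Int) :
    pairsC (min m e) xs = (pairsC e xs).map (fun p => (p.1, max p.2 (p.1 - m))) := by
  induction xs generalizing e with
  | nil => simp [pairsC]
  | cons x xs ih =>
      simp only [pairsC, List.map_cons]
      refine congrArg₂ _ (Prod.ext rfl ?_) ?_
      · simp only; omega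
      · rw [min_assoc, ih]

lemma pairsC_append (l r : List Int) (m : Int) :
    pairsC m (l ++ r) = pairsC m l ++ pairsC (l.foldl min m) r := by
  induction l generalizing m with
  | nil => simp [pairsC]
  | cons x xs ih => simp only [List.cons_append, pairsC, ih, List.foldl_cons]

lemma foldl_min_min (l : List Int) (a b : Int) :
    l.foldl min (min a b) = min a (l.foldl min b) := by
  induction l generalizing b with
  | nil => simp
  | cons x xs ih => rw [List.foldl_cons, min_assoc, ih, List.foldl_cons]

-- characterisation of Source B's solve on a nonempty segment
lemma solveB_spec (n : Nat) (x : Int) (xs : List Int) (hle : (x :: xs).length ≤ n) :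
    solveB (x :: xs) = ((x, 0) :: pairsC x xs, xs.foldl min x) := by
  induction n generalizing x xs with
  | zero => simp at hle
  | succ n ih =>
      rw [solveB]
      by_cases h1 : (x :: xs).length ≤ 1
      · have hx : xs = [] := by
          cases xs with
          | nil => rfl
          | cons b bs => simp at h1
        subst hx
        simp [pairsC]
      · rw [dif_neg h1]
        have hlen : 2 ≤ xs.length + 1 := by simp only [List.length_cons] at h1; omega
        obtain ⟨k, hk⟩ : ∃ k, (x :: xs).length / 2 = k + 1 := by
          refine ⟨(x :: xs).length / 2 - 1, ?_⟩
          simp only [List.length_cons]; omega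
        have hkxs : k < xs.length := by
          simp only [List.length_cons] at hk; omega
        simp only [hk, List.take_succ_cons, List.drop_succ_cons]
        rw [List.drop_eq_getElem_cons hkxs]
        have hn : xs.length ≤ n := by simp only [List.length_cons] at hle; omega
        rw [ih x (xs.take k) (by simp only [List.length_cons, List.length_take]; omega),
            ih (xs[k]) (xs.drop (k + 1)) (by simp only [List.length_cons, List.length_drop]; omega)]
        simp only
        refine Prod.ext ?_ ?_
        · -- the pair lists
          have hxs : xs = xs.take k ++ (xs[k] :: xs.drop (k + 1)) := by
            conv_lhs => rw [← List.take_append_drop k xs]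
            rw [List.drop_eq_getElem_cons hkxs]
          conv_rhs => rw [hxs]
          rw [pairsC_append]
          simp only [pairsC, List.map_cons, List.cons_append, ← pairsC_comb,
            List.cons.injEq, List.append_right_inj, Prod.mk.injEq, true_and, and_true]
          omega
        · -- the minima
          have hxs : xs = xs.take k ++ (xs[k] :: xs.drop (k + 1)) := by
            conv_lhs => rw [← List.take_append_drop k xs]
            rw [List.drop_eq_getElem_cons hkxs]
          conv_rhs => rw [hxs]
          rw [List.foldl_append, List.foldl_cons, foldl_min_min]

-- the clamped deficits are exactly A's loop outputs
lemma map_pairsC (xs : List Int) (m : Int) :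
    (pairsC m xs).map (fun q => max 0 q.2) = coreA m xs := by
  induction xs generalizing m with
  | nil => simp [pairsC, coreA]
  | cons x xs ih =>
      simp only [pairsC, coreA, List.map_cons, ih]
      refine congrArg₂ _ ?_ rfl
      omega

-- ===== VERDICT (by name: the statement is the Claim_ definition above) =====
theorem find_profits_spec : Claim_equal_find_profits := by
  intro prices _ hpre
  unfold Spec_find_profits
  obtain ⟨p, r, rfl⟩ := List.exists_cons_of_ne_nil hpre
  rw [A_eq_core]
  have hB : find_profits_alt (p :: r)
      = ((solveB (tAdj (p :: r))).1).map (fun q => max 0 q.2) := by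
    simp [find_profits_alt, tAdj]
  rw [hB]
  have hsplit : tAdj (p :: r)
      = p :: (r.zipIdx 1).map (fun q => q.1 + (q.2 : Int)) := by
    simp [tAdj, List.zipIdx_cons]
  rw [hsplit,
    solveB_spec (((r.zipIdx 1).map (fun q => q.1 + (q.2 : Int))).length + 1) p _ (by simp)]
  simp only [List.map_cons, map_pairsC, PySem.List.pyGetD_zero_cons, add_zero, coreA,
    sub_self, min_self]
  simp
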